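-- pv_equiv track=rewrite | github.com/Schaechtle/VentIPyN | SPs/cycleChecker.py | bin2graph_unsorted
-- ===== SOURCE A (Python) =====
-- def computeNegIndex(i,j,n):
--     return n*n - ((i-1)*n + j) + 1
--
-- def bin2graph_unsorted(bindag,n):
--     lenbinRep =len(bindag)-2
--     graph_unsorted = []
--     for i in range(n):
--         children =[]
--         for j in range(n):
--                 negindex = computeNegIndex(i+1,j+1,n)
--                 if negindex<=lenbinRep:
--                     if  bindag[-negindex]=="1":
--                         children.append(j)
--         graph_unsorted.append((i,children))
--     return graph_unsorted
-- ===== SOURCE B (Python) =====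
-- def bin2graph_unsorted(bindag, n):
--     base = n * n - len(bindag)
--     kids = {}
--     for idx, ch in enumerate(bindag):
--         k = base + idx
--         if idx >= 2 and ch == "1" and 0 <= k < n * n:
--             kids.setdefault(k // n, []).append(k % n)
--     return [(i, kids.get(i, [])) for i in range(n)]
-- ===== Notes on version B (the rewrite author's own statement) =====
-- stated objective: alternative
-- what changed: Replaces the nested n-by-n scan that computes a negative string index per (i,j) pair with a single forward pass over the string that decodes each qualifying position idx into a cell k = n*n - len + idx and groups children by k // n in a dict, then emits the rows from the dict.
import Mathlib
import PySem

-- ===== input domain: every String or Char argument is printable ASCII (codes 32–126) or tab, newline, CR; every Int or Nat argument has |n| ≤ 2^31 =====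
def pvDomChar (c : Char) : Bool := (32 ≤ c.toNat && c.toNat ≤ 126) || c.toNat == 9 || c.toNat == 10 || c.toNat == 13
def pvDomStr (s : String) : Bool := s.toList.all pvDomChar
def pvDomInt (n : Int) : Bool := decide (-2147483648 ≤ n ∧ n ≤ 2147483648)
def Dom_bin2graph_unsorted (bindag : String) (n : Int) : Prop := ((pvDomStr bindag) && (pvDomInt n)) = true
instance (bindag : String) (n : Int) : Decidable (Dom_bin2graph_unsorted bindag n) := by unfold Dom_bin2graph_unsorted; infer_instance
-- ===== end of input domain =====

-- B replaces A's nested n×n scan (one negative string index per (i,j) pair) by a single forward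
-- pass over the string that decodes each position into a cell k and groups children by k // n in a dict.

-- ===== PORT A =====
def computeNegIndex (i j n : Int) : Int := n*n - ((i-1)*n + j) + 1

-- literal port of A; the access bindag[-negindex] is PySem.Str.pyGet? (in A it is only reached
-- under the guard negindex <= len-2, where it never raises, so the none case never fires)
def bin2graph_unsorted (bindag : String) (n : Int) : List (Int × List Int) :=
  let lenbinRep : Int := PySem.Str.len bindag - 2
  (PySem.List.pyRange 0 n 1).foldl (fun graph i =>
    let children := (PySem.List.pyRange 0 n 1).foldl (fun children j =>
      let negindex := computeNegIndex (i+1) (j+1) n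
      if negindex ≤ lenbinRep then
        if PySem.Str.pyGet? bindag (-negindex) = some '1' then children ++ [j] else children
      else children) ([] : List Int)
    graph ++ [(i, children)]) []

-- ===== PORT B =====
-- port of Source B; kids.setdefault(k // n, []).append(k % n) is PySem.Dict.modify key [] (· ++ [val])
def bin2graph_unsorted_alt (bindag : String) (n : Int) : List (Int × List Int) :=
  let base : Int := n*n - PySem.Str.len bindag
  let kids := (PySem.List.enumerate bindag.toList 0).foldl (fun kids p =>
      let k := base + p.1
      if 2 ≤ p.1 ∧ p.2 = '1' ∧ 0 ≤ k ∧ k < n*n then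
        PySem.Dict.modify kids (PySem.Int.floordiv k n) [] (· ++ [PySem.Int.mod k n])
      else kids) PySem.Dict.empty
  (PySem.List.pyRange 0 n 1).map (fun i => (i, kids.getD i []))

-- ===== PRECONDITION & SPEC =====
def Spec_bin2graph_unsorted (bindag : String) (n : Int) (out : List (Int × List Int)) : Prop := out = bin2graph_unsorted_alt bindag n
instance (bindag : String) (n : Int) (out : List (Int × List Int)) : Decidable (Spec_bin2graph_unsorted bindag n out) := by unfold Spec_bin2graph_unsorted; infer_instance

-- ===== CLAIM (what is proved, stated in full; the proofs are below) =====
def Claim_equal_bin2graph_unsorted : Prop := ∀ (bindag : String) (n : Int), Dom_bin2graph_unsorted bindag n → Spec_bin2graph_unsorted bindag n (bin2graph_unsorted bindag n)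

-- ===== LEMMAS AND PROOFS =====

-- the common per-row shape: for row i, cell k is a child iff k lies in row i's cell range,
-- its string position idx = k - (n*n - len) is ≥ 2, and the character there is '1'
def pvF (L : List Char) (n i k : Int) : Option Int :=
  if i*n ≤ k ∧ k < i*n + n ∧ 2 ≤ k - (n*n - (L.length : Int)) ∧
     L[(k - (n*n - (L.length : Int))).toNat]? = some '1'
  then some (k - i*n) else none

lemma pvF_support (L : List Char) (n i k : Int) (h : (pvF L n i k).isSome) :
    (i*n ≤ k ∧ k < i*n + n) ∧ (n*n - (L.length : Int) + 2 ≤ k ∧ k < n*n) := by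
  unfold pvF at h
  split at h
  · rename_i hc
    obtain ⟨h1, h2, h3, h4⟩ := hc
    obtain ⟨hlt, -⟩ := List.getElem?_eq_some_iff.mp h4
    have h0 : ((k - (n*n - (L.length : Int))).toNat : Int) = k - (n*n - (L.length : Int)) :=
      Int.toNat_of_nonneg (by omega)
    omega
  · simp at h

-- trimming a filterMap over an integer range to any range containing the support
lemma filterMap_pyRange_trim (F : Int → Option Int) (a b c d : Int)
    (h : ∀ k, (F k).isSome → c ≤ k ∧ k < d) :
    (PySem.List.pyRange a b 1).filterMap F = (PySem.List.pyRange (max a c) (min b d) 1).filterMap F := by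
  have hnone : ∀ k : Int, ¬ (c ≤ k ∧ k < d) → F k = none := by
    intro k hk
    by_contra hne
    exact hk (h k (Option.isSome_iff_ne_none.mpr hne))
  by_cases hab : b ≤ a
  · rw [PySem.List.pyRange_one_eq_nil hab, PySem.List.pyRange_one_eq_nil (by omega)]
  · by_cases hmm : min b d ≤ max a c
    · rw [PySem.List.pyRange_one_eq_nil hmm, List.filterMap_nil]
      rw [List.filterMap_eq_nil_iff]
      intro k hk
      rw [PySem.List.mem_pyRange_one] at hk
      exact hnone k (by omega)
    · rw [PySem.List.pyRange_one_append a (max a c) b (le_max_left a c) (by omega),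
          PySem.List.pyRange_one_append (max a c) (min b d) b (by omega) (by omega),
          List.filterMap_append, List.filterMap_append]
      have hpre : (PySem.List.pyRange a (max a c) 1).filterMap F = [] := by
        rw [List.filterMap_eq_nil_iff]
        intro k hk
        rw [PySem.List.mem_pyRange_one] at hk
        exact hnone k (by omega)
      have hsuf : (PySem.List.pyRange (min b d) b 1).filterMap F = [] := by
        rw [List.filterMap_eq_nil_iff]
        intro k hk
        rw [PySem.List.mem_pyRange_one] at hk
        exact hnone k (by omega)
      rw [hpre, hsuf]
      simp

lemma filter_eq_filterMap {α : Type} (l : List α) (q : α → Bool) :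
    l.filter q = l.filterMap (fun x => if q x then some x else none) := by
  induction l with
  | nil => rfl
  | cons x t ih => by_cases h : q x <;> simp [h, ih]

lemma filter_map_to_filterMap {α β : Type} (l : List α) (q : α → Bool) (f : α → β) :
    (l.filter q).map f = l.filterMap (fun x => if q x then some (f x) else none) := by
  induction l with
  | nil => rfl
  | cons x t ih => by_cases h : q x <;> simp [h, ih]

lemma filter_filter_map_to_filterMap {α β : Type} (l : List α) (q r : α → Bool) (f : α → β) :
    ((l.filter q).filter r).map f
      = l.filterMap (fun x => if r x && q x then some (f x) else none) := by
  rw [List.filter_filter, filter_map_to_filterMap]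

lemma pyRange_shift (c a b : Int) :
    PySem.List.pyRange (c+a) (c+b) 1 = (PySem.List.pyRange a b 1).map (fun x => c + x) := by
  rw [PySem.List.pyRange_one, PySem.List.pyRange_one, List.map_map]
  have h : c + b - (c + a) = b - a := by ring
  rw [h]
  apply List.map_congr_left
  intro k _
  show c + a + (k : Int) = c + (a + k)
  ring

lemma pyGet?_neg_int (L : List Char) (m : Int) (h1 : 0 < m) (h2 : m ≤ L.length) :
    PySem.List.pyGet? L (-m) = L[((L.length : Int) - m).toNat]? := by
  have hm : ((m.toNat : Int)) = m := Int.toNat_of_nonneg (by omega)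
  rw [← hm, PySem.List.pyGet?_neg_natCast L m.toNat (by omega) (by omega)]
  congr 1
  omega

-- a grouping loop keyed/valued through a projection is the same loop over the projected pairs
lemma foldl_modify_key_val {κ β γ : Type} [BEq κ] (l : List γ) (key : γ → κ) (val : γ → β)
    (d : PySem.Dict κ (List β)) :
    l.foldl (fun d p => d.modify (key p) [] (· ++ [val p])) d
      = (l.map (fun p => (key p, val p))).foldl (fun d q => d.modify q.1 [] (· ++ [q.2])) d := by
  induction l generalizing d with
  | nil => rfl
  | cons x t ih => exact ih _

-- row of A: the inner j-loop as a filterMap over the cell range of row i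
lemma rowA_eq (bindag : String) (n i : Int) (hi0 : 0 ≤ i) (hin : i < n) :
    ((PySem.List.pyRange 0 n 1).foldl (fun children j =>
      let negindex := computeNegIndex (i+1) (j+1) n
      if negindex ≤ PySem.Str.len bindag - 2 then
        if PySem.Str.pyGet? bindag (-negindex) = some '1' then children ++ [j] else children
      else children) ([] : List Int))
    = (PySem.List.pyRange (i*n) (i*n + n) 1).filterMap (pvF bindag.toList n i) := by
  have hstep : (fun (children : List Int) (j : Int) =>
      let negindex := computeNegIndex (i+1) (j+1) n
      if negindex ≤ PySem.Str.len bindag - 2 then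
        if PySem.Str.pyGet? bindag (-negindex) = some '1' then children ++ [j] else children
      else children)
      = fun children j =>
        if (computeNegIndex (i+1) (j+1) n ≤ PySem.Str.len bindag - 2 ∧
            PySem.Str.pyGet? bindag (-(computeNegIndex (i+1) (j+1) n)) = some '1')
        then children ++ [j] else children := by
    funext children j
    show (if computeNegIndex (i+1) (j+1) n ≤ PySem.Str.len bindag - 2 then
        if PySem.Str.pyGet? bindag (-(computeNegIndex (i+1) (j+1) n)) = some '1' then children ++ [j] else children
      else children) = _
    by_cases h1 : computeNegIndex (i+1) (j+1) n ≤ PySem.Str.len bindag - 2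
    · by_cases h2 : PySem.Str.pyGet? bindag (-(computeNegIndex (i+1) (j+1) n)) = some '1'
      · rw [if_pos h1, if_pos h2, if_pos ⟨h1, h2⟩]
      · rw [if_pos h1, if_neg h2, if_neg (by tauto)]
    · rw [if_neg h1, if_neg (by tauto)]
  rw [hstep, PySem.List.foldl_append_ite_eq_filter, List.nil_append]
  have htwo : PySem.List.pyRange (i*n) (i*n + n) 1
      = (PySem.List.pyRange 0 n 1).map (fun x => i*n + x) := by
    have e0 : i*n = i*n + 0 := by ring
    rw [show PySem.List.pyRange (i*n) (i*n+n) 1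
          = PySem.List.pyRange (i*n + 0) (i*n + n) 1 from by rw [← e0]]
    exact pyRange_shift (i*n) 0 n
  rw [htwo, List.filterMap_map, filter_eq_filterMap]
  apply List.filterMap_congr
  intro j hj
  rw [PySem.List.mem_pyRange_one] at hj
  obtain ⟨hj0, hjn⟩ := hj
  have hub : i*n + j < n*n := by nlinarith
  have hlb : (0:Int) ≤ i*n := mul_nonneg hi0 (by omega)
  simp only [Function.comp_apply, PySem.Str.len_eq, PySem.Str.pyGet?_eq,
    PySem.Chars.pyGet?_eq_listPyGet?]
  have hneg : computeNegIndex (i+1) (j+1) n = n*n - (i*n + j) := by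
    unfold computeNegIndex; ring
  rw [hneg]
  unfold pvF
  by_cases h2 : 2 ≤ (i*n + j) - (n*n - (bindag.toList.length : Int))
  · have hidx : ((bindag.toList.length : Int) - (n*n - (i*n + j))).toNat
        = ((i*n + j) - (n*n - (bindag.toList.length : Int))).toNat := by omega
    simp only [decide_eq_true_eq,
      pyGet?_neg_int bindag.toList (n*n - (i*n + j)) (by omega) (by omega), hidx]
    apply if_congr
    · constructor
      · rintro ⟨-, hB⟩
        exact ⟨by omega, by omega, by omega, hB⟩
      · rintro ⟨-, -, -, hB⟩
        exact ⟨by omega, hB⟩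
    · congr 1
      ring
    · rfl
  · rw [if_neg (by rw [decide_eq_true_eq]; rintro ⟨hA, -⟩; omega), if_neg (by omega)]

-- row of B: what the dict built by the single pass holds at key i
lemma rowB_eq (bindag : String) (n i : Int) (hi0 : 0 ≤ i) (hin : i < n) :
    (((PySem.List.enumerate bindag.toList 0).foldl (fun kids p =>
      let k := (n*n - PySem.Str.len bindag) + p.1
      if 2 ≤ p.1 ∧ p.2 = '1' ∧ 0 ≤ k ∧ k < n*n then
        PySem.Dict.modify kids (PySem.Int.floordiv k n) [] (· ++ [PySem.Int.mod k n])
      else kids) PySem.Dict.empty).getD i [])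
    = (PySem.List.pyRange (n*n - PySem.Str.len bindag) (n*n) 1).filterMap (pvF bindag.toList n i) := by
  have hn : (0:Int) < n := by omega
  have hlb : (0:Int) ≤ i*n := mul_nonneg hi0 (by omega)
  have hinn : i*n + n ≤ n*n := by nlinarith
  rw [show (fun (kids : PySem.Dict Int (List Int)) (p : Int × Char) =>
      let k := (n*n - PySem.Str.len bindag) + p.1
      if 2 ≤ p.1 ∧ p.2 = '1' ∧ 0 ≤ k ∧ k < n*n then
        PySem.Dict.modify kids (PySem.Int.floordiv k n) [] (· ++ [PySem.Int.mod k n])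
      else kids)
    = (fun kids p =>
      if (2 ≤ p.1 ∧ p.2 = '1' ∧ 0 ≤ (n*n - PySem.Str.len bindag) + p.1 ∧
          (n*n - PySem.Str.len bindag) + p.1 < n*n) then
        PySem.Dict.modify kids
          (PySem.Int.floordiv ((n*n - PySem.Str.len bindag) + p.1) n) []
          (· ++ [PySem.Int.mod ((n*n - PySem.Str.len bindag) + p.1) n])
      else kids) from rfl]
  rw [PySem.List.foldl_ite_eq_foldl_filter]
  rw [foldl_modify_key_val _
      (fun p : Int × Char => PySem.Int.floordiv ((n*n - PySem.Str.len bindag) + p.1) n)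
      (fun p : Int × Char => PySem.Int.mod ((n*n - PySem.Str.len bindag) + p.1) n)]
  rw [PySem.Dict.getD_foldl_modify_append]
  rw [show (PySem.Dict.empty : PySem.Dict Int (List Int)).getD i [] = [] from rfl, List.nil_append]
  rw [List.filter_map, List.map_map, filter_filter_map_to_filterMap]
  rw [PySem.List.enumerate_eq_map_pyRange bindag.toList ' ', List.filterMap_map]
  rw [show PySem.List.pyRange (n*n - PySem.Str.len bindag) (n*n) 1
        = (PySem.List.pyRange 0 (PySem.List.len bindag.toList) 1).map
            (fun x => (n*n - PySem.Str.len bindag) + x) from by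
      rw [show PySem.List.pyRange (n*n - PySem.Str.len bindag) (n*n) 1
            = PySem.List.pyRange ((n*n - PySem.Str.len bindag) + 0)
                ((n*n - PySem.Str.len bindag) + PySem.List.len bindag.toList) 1 from by
          rw [add_zero]
          congr 1
          simp [PySem.Str.len_eq, PySem.List.len]]
      exact pyRange_shift _ 0 _]
  rw [List.filterMap_map]
  apply List.filterMap_congr
  intro j hj
  rw [PySem.List.mem_pyRange_one] at hj
  obtain ⟨hj0, hjlen⟩ := hj
  have hjlen' : j < (bindag.toList.length : Int) := by
    simpa [PySem.List.len] using hjlen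
  simp only [Function.comp_apply, PySem.Str.len_eq]
  rw [PySem.List.pyGetD_eq_getElem bindag.toList ' ' hj0 hjlen']
  have hget : (bindag.toList[j.toNat] = '1') ↔ (bindag.toList[j.toNat]? = some '1') := by
    rw [List.getElem?_eq_getElem (by omega)]
    simp
  unfold pvF
  by_cases hC : i*n ≤ (n*n - (bindag.toList.length : Int)) + j ∧
      (n*n - (bindag.toList.length : Int)) + j < i*n + n
  · have hdiv : PySem.Int.floordiv ((n*n - (bindag.toList.length : Int)) + j) n = i := by
      rw [PySem.Int.floordiv_eq_iff_of_pos hn]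
      constructor
      · exact hC.1
      · have : (i+1)*n = i*n + n := by ring
        omega
    have hmod : PySem.Int.mod ((n*n - (bindag.toList.length : Int)) + j) n
        = (n*n - (bindag.toList.length : Int)) + j - i*n := by
      have := PySem.Int.floordiv_mul_add_mod ((n*n - (bindag.toList.length : Int)) + j) n
      rw [hdiv] at this
      omega
    simp only [hmod, hdiv, decide_eq_true_eq, Bool.and_eq_true, beq_iff_eq, true_and]
    apply if_congr
    · constructor
      · rintro ⟨h2j, hb, -, -⟩
        refine ⟨hC.1, hC.2, by omega, ?_⟩
        rw [show (n*n - (bindag.toList.length : Int) + j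
            - (n*n - (bindag.toList.length : Int))).toNat = j.toNat from by omega, ← hget]
        exact hb
      · rintro ⟨-, -, h3, h4⟩
        rw [show (n*n - (bindag.toList.length : Int) + j
            - (n*n - (bindag.toList.length : Int))).toNat = j.toNat from by omega] at h4
        exact ⟨by omega, by rw [hget]; exact h4, by omega, by omega⟩
    · rfl
    · rfl
  · rw [if_neg, if_neg (by tauto)]
    simp only [decide_eq_true_eq, Bool.and_eq_true, beq_iff_eq]
    rintro ⟨hdiv, -, -, hk0, hkn⟩
    rw [PySem.Int.floordiv_eq_iff_of_pos hn] at hdiv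
    have hmul : (i+1)*n = i*n + n := by ring
    omega

-- ===== VERDICT (by name: the statement is the Claim_ definition above) =====
theorem bin2graph_unsorted_spec : Claim_equal_bin2graph_unsorted := by
  intro bindag n _
  unfold Spec_bin2graph_unsorted
  simp only [bin2graph_unsorted, bin2graph_unsorted_alt]
  rw [PySem.List.foldl_append_singleton_eq_map, List.nil_append]
  apply List.map_congr_left
  intro i hi
  rw [PySem.List.mem_pyRange_one] at hi
  refine congrArg (Prod.mk i) ?_
  rw [rowA_eq bindag n i hi.1 hi.2, rowB_eq bindag n i hi.1 hi.2]
  rw [filterMap_pyRange_trim (pvF bindag.toList n i) (i*n) (i*n + n)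
        (max (i*n) ((n*n - (bindag.toList.length : Int)) + 2)) (min (i*n + n) (n*n))
        (fun k hk => by have := pvF_support bindag.toList n i k hk; omega),
      filterMap_pyRange_trim (pvF bindag.toList n i) (n*n - PySem.Str.len bindag) (n*n)
        (max (i*n) ((n*n - (bindag.toList.length : Int)) + 2)) (min (i*n + n) (n*n))
        (fun k hk => by have := pvF_support bindag.toList n i k hk; omega)]
  simp only [PySem.Str.len_eq]
  rw [show max (i*n) (max (i*n) ((n*n - (bindag.toList.length : Int)) + 2))
        = max (n*n - (bindag.toList.length : Int)) (max (i*n) ((n*n - (bindag.toList.length : Int)) + 2)) from by omega,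
      show min (i*n + n) (min (i*n + n) (n*n)) = min (n*n) (min (i*n + n) (n*n)) from by omega]
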